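-- pv_equiv track=rewrite | github.com/guilhermelasinskas/trabalho-ecom06 | entity_validator.py | validate_file
-- ===== SOURCE A (Python) =====
-- def validate_file(token, isFile=False):
--
--     for c in token:
--         ok = False
--         if 'a' <= c and c <= 'z':
--             ok = True
--         elif 'A' <= c and c <= 'Z':
--             ok = True
--         elif '0' <= c and c <= '9':
--             ok = True
--         elif c == '_':
--             ok = True
--         # MEXER NISSO AQUI#
--         elif c == '.' and isFile:
--             ok = True
--         # MEXER NISSO AQUI#
--         if (not ok):
--             return ok
--
--     return True
-- ===== SOURCE B (Python) =====
-- def validate_file(token, isFile=False):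
--     allowed = set("abcdefghijklmnopqrstuvwxyzABCDEFGHIJKLMNOPQRSTUVWXYZ0123456789_")
--     if isFile:
--         allowed.add('.')
--     return not (set(token) - allowed)
-- ===== Notes on version B (the rewrite author's own statement) =====
-- stated objective: idiomatic
-- what changed: Replaces the per-character branch ladder with early return by a one-shot set computation: build the allowed-character set once, then test emptiness of set(token) minus it.
import Mathlib
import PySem

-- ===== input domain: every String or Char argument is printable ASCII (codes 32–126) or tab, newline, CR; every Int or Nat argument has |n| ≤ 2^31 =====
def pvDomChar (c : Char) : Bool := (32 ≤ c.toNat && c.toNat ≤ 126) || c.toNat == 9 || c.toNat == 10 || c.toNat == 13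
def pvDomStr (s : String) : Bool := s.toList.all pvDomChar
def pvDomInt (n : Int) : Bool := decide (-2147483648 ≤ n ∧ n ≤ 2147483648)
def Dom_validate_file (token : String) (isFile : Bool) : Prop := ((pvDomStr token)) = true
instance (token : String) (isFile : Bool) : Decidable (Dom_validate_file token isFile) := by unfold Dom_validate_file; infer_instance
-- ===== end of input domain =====

-- B replaces A's per-character branch ladder with a set-difference emptiness test (idiomatic, same cost).


-- ===== PORT A =====
-- the body of A's for-loop: the if/elif ladder setting ok, then 'if not ok: return ok'
def vfLoop (isFile : Bool) : List Char → Bool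
  | [] => true
  | c :: rest =>
    let ok := false
    let ok := if 'a' ≤ c && c ≤ 'z' then true
      else if 'A' ≤ c && c ≤ 'Z' then true
      else if '0' ≤ c && c ≤ '9' then true
      else if c == '_' then true
      else if c == '.' && isFile then true
      else ok
    if !ok then ok else vfLoop isFile rest

def validate_file (token : String) (isFile : Bool) : Bool :=
  vfLoop isFile token.toList

-- ===== PORT B =====
def vfAllowedBase : List Char :=
  "abcdefghijklmnopqrstuvwxyzABCDEFGHIJKLMNOPQRSTUVWXYZ0123456789_".toList

def validate_file_alt (token : String) (isFile : Bool) : Bool :=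
  let allowed : PySem.Set Char := PySem.Set.ofList vfAllowedBase
  let allowed := if isFile then PySem.Set.add allowed '.' else allowed
  -- 'not (set(token) - allowed)'
  (PySem.Set.diff (PySem.Set.ofList token.toList) allowed).isEmpty

-- ===== PRECONDITION & SPEC =====
def Spec_validate_file (token : String) (isFile : Bool) (out : Bool) : Prop := out = validate_file_alt token isFile
instance (token : String) (isFile : Bool) (out : Bool) : Decidable (Spec_validate_file token isFile out) := by unfold Spec_validate_file; infer_instance

-- ===== CLAIM (what is proved, stated in full; the proofs are below) =====
def Claim_equal_validate_file : Prop := ∀ (token : String) (isFile : Bool), Dom_validate_file token isFile → Spec_validate_file token isFile (validate_file token isFile)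

-- ===== LEMMAS AND PROOFS =====

-- the ladder as a predicate on one character
def vfOk (isFile : Bool) (c : Char) : Bool :=
  if 'a' ≤ c && c ≤ 'z' then true
  else if 'A' ≤ c && c ≤ 'Z' then true
  else if '0' ≤ c && c ≤ '9' then true
  else if c == '_' then true
  else if c == '.' && isFile then true
  else false

lemma vfLoop_eq_all (isFile : Bool) (cs : List Char) :
    vfLoop isFile cs = cs.all (vfOk isFile) := by
  induction cs with
  | nil => rfl
  | cons c rest ih =>
    show (if !(vfOk isFile c) then vfOk isFile c else vfLoop isFile rest)
          = (c :: rest).all (vfOk isFile)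
    rw [List.all_cons, ← ih]
    cases h : vfOk isFile c <;> simp

-- membership in B's allowed set, characterised
lemma mem_allowed (isFile : Bool) (c : Char) :
    (c ∈ (if isFile then PySem.Set.add (PySem.Set.ofList vfAllowedBase) '.'
          else PySem.Set.ofList vfAllowedBase))
      ↔ (c ∈ vfAllowedBase ∨ (isFile = true ∧ c = '.')) := by
  cases isFile <;>
    simp [PySem.Set.mem_add, PySem.Set.mem_ofList]

-- per-character bridge, checked over all ASCII codes < 127 (Dom only contains such chars)
set_option maxRecDepth 8192 in
lemma vfOk_bridge_nat : ∀ n : Nat, n < 127 → ∀ f : Bool,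
    (vfOk f (Char.ofNat n) == (vfAllowedBase.contains (Char.ofNat n) || (f && Char.ofNat n == '.'))) = true := by
  decide

lemma vfOk_bridge (c : Char) (h : pvDomChar c = true) (f : Bool) :
    vfOk f c = (vfAllowedBase.contains c || (f && c == '.')) := by
  have hlt : c.toNat < 127 := by
    simp only [pvDomChar, Bool.or_eq_true, Bool.and_eq_true, decide_eq_true_eq, beq_iff_eq,
      Nat.le_iff_lt_or_eq] at h
    omega
  have hc : Char.ofNat c.toNat = c := Char.ofNat_toNat c
  have := vfOk_bridge_nat c.toNat hlt f
  rw [hc] at this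
  exact eq_of_beq this

-- ===== VERDICT (by name: the statement is the Claim_ definition above) =====
theorem validate_file_spec : Claim_equal_validate_file := by
  intro token isFile hdom
  unfold Spec_validate_file validate_file validate_file_alt
  rw [vfLoop_eq_all]
  have hdom' : ∀ c ∈ token.toList, pvDomChar c = true := by
    simpa [Dom_validate_file, pvDomStr, List.all_eq_true] using hdom
  rw [Bool.eq_iff_iff, List.all_eq_true, List.isEmpty_iff, List.eq_nil_iff_forall_not_mem]
  constructor
  · intro hall x hx
    rw [PySem.Set.mem_diff, PySem.Set.mem_ofList] at hx
    obtain ⟨hxm, hxa⟩ := hx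
    have h1 := hall x hxm
    rw [vfOk_bridge x (hdom' x hxm) isFile] at h1
    apply hxa
    rw [mem_allowed]
    rcases Bool.or_eq_true _ _ |>.mp h1 with hb | hf
    · exact Or.inl (List.contains_iff_mem.mp hb)
    · obtain ⟨hf1, hf2⟩ := Bool.and_eq_true _ _ |>.mp hf
      exact Or.inr ⟨hf1, eq_of_beq hf2⟩
  · intro hemp c hc
    rw [vfOk_bridge c (hdom' c hc) isFile]
    by_contra hne
    apply hemp c
    rw [PySem.Set.mem_diff, PySem.Set.mem_ofList, mem_allowed]
    refine ⟨hc, fun hmem => hne ?_⟩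
    rcases hmem with hb | ⟨hf, hd⟩
    · exact Bool.or_eq_true _ _ |>.mpr (Or.inl (List.contains_iff_mem.mpr hb))
    · have hb2 : (isFile && (c == '.')) = true := by rw [hf, hd]; rfl
      simp [hb2]
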